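-- pv_equiv track=rewrite | github.com/DevbyNaveen/X-Seven | app/core/dspy/modules/voice_optimized_modules.py | _optimize_for_speech
-- ===== SOURCE A (Python) =====
-- def _optimize_for_speech(response: str) -> str:
--     """Optimize response text for natural speech synthesis."""
--     if not response:
--         return "I'm here to help you."
--
--     # Remove or replace elements that don't work well in speech
--     optimized = response
--
--     # Replace abbreviations with full words
--     speech_replacements = {
--         "AI": "A I",
--         "API": "A P I",
--         "URL": "U R L",
--         "HTTP": "H T T P",
--         "JSON": "J S O N",
--         "&": "and",
--         "@": "at",
--         "%": "percent",
--         "$": "dollars",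
--         "#": "number"
--     }
--
--     for abbrev, full in speech_replacements.items():
--         optimized = optimized.replace(abbrev, full)
--
--     # Ensure proper punctuation for speech pauses
--     if not optimized.endswith(('.', '!', '?')):
--         optimized += '.'
--
--     # Break up very long sentences
--     if len(optimized) > 150:
--         sentences = optimized.split('. ')
--         if len(sentences) > 2:
--             optimized = '. '.join(sentences[:2]) + '.'
--
--     return optimized
-- ===== SOURCE B (Python) =====
-- import re
--
-- _SPEECH_REPLACEMENTS = {
--     "AI": "A I",
--     "API": "A P I",
--     "URL": "U R L",
--     "HTTP": "H T T P",
--     "JSON": "J S O N",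
--     "&": "and",
--     "@": "at",
--     "%": "percent",
--     "$": "dollars",
--     "#": "number",
-- }
--
-- # One precompiled alternation of the (escaped) keys, in dict order.
-- _SPEECH_PATTERN = re.compile("|".join(re.escape(k) for k in _SPEECH_REPLACEMENTS))
--
--
-- def _optimize_for_speech(response: str) -> str:
--     """Optimize response text for natural speech synthesis."""
--     if not response:
--         return "I'm here to help you."
--
--     # Single left-to-right pass: each match is looked up in the table.
--     optimized = _SPEECH_PATTERN.sub(lambda m: _SPEECH_REPLACEMENTS[m.group(0)], response)
--
--     # Ensure proper punctuation for speech pauses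
--     if not optimized.endswith(('.', '!', '?')):
--         optimized += '.'
--
--     # Break up very long sentences
--     if len(optimized) > 150:
--         sentences = optimized.split('. ')
--         if len(sentences) > 2:
--             optimized = '. '.join(sentences[:2]) + '.'
--
--     return optimized
-- ===== Notes on version B (the rewrite author's own statement) =====
-- stated objective: idiomatic
-- what changed: The loop of ten whole-string .replace passes is replaced by one precompiled regex alternation applied in a single left-to-right pass with a table lookup per match; the empty-guard, punctuation append and long-sentence split are unchanged.
import Mathlib
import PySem

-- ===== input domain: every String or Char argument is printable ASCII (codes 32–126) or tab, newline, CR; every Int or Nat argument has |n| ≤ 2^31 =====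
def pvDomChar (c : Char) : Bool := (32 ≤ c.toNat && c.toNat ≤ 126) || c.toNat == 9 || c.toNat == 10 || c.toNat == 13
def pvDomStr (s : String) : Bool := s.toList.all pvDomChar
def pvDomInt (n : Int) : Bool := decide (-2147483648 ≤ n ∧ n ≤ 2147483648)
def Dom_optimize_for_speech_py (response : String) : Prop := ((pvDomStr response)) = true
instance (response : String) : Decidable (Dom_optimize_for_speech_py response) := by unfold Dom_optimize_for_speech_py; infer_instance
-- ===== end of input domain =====

-- B replaces A's loop of ten whole-string .replace passes with a single left-to-right
-- pass (a precompiled regex alternation in Source B); objective: idiomatic, same result.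

-- ===== PORT A =====
def optimize_for_speech_py (response : String) : String :=
  if response = "" then "I'm here to help you."
  else
    let optimized := response
    let optimized := PySem.Str.replace optimized "AI" "A I"
    let optimized := PySem.Str.replace optimized "API" "A P I"
    let optimized := PySem.Str.replace optimized "URL" "U R L"
    let optimized := PySem.Str.replace optimized "HTTP" "H T T P"
    let optimized := PySem.Str.replace optimized "JSON" "J S O N"
    let optimized := PySem.Str.replace optimized "&" "and"
    let optimized := PySem.Str.replace optimized "@" "at"
    let optimized := PySem.Str.replace optimized "%" "percent"
    let optimized := PySem.Str.replace optimized "$" "dollars"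
    let optimized := PySem.Str.replace optimized "#" "number"
    let optimized :=
      if PySem.Str.endswith optimized "." || PySem.Str.endswith optimized "!" ||
          PySem.Str.endswith optimized "?" then optimized
      else optimized ++ "."
    if 150 < PySem.Str.len optimized then
      -- split('. '): the separator is nonempty, so split? is always `some` here (exact)
      let sentences := (PySem.Str.split? optimized ". ").getD []
      if 2 < sentences.length then
        PySem.Str.join ". " (PySem.List.slice sentences none (some 2)) ++ "."
      else optimized
    else optimized

-- ===== PORT B =====
-- Hand port of Source B's single `re.sub` pass: the pattern is an alternation of the ten
-- literal keys in dict order, so `sub` is exactly a left-to-right scan that, at each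
-- position, tries the keys in that order, emits the table entry for a match and skips
-- it, and otherwise copies the character.  Exact: the alternatives are literals (no
-- backtracking), and re.escape only quotes them.
def speechScan : List Char → List Char
  | [] => []
  | c :: t =>
    if ['A','I'].isPrefixOf (c :: t) then 'A'::' '::'I' :: speechScan (t.drop 1)
    else if ['A','P','I'].isPrefixOf (c :: t) then 'A'::' '::'P'::' '::'I' :: speechScan (t.drop 2)
    else if ['U','R','L'].isPrefixOf (c :: t) then 'U'::' '::'R'::' '::'L' :: speechScan (t.drop 2)
    else if ['H','T','T','P'].isPrefixOf (c :: t) then 'H'::' '::'T'::' '::'T'::' '::'P' :: speechScan (t.drop 3)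
    else if ['J','S','O','N'].isPrefixOf (c :: t) then 'J'::' '::'S'::' '::'O'::' '::'N' :: speechScan (t.drop 3)
    else if c == '&' then 'a'::'n'::'d' :: speechScan t
    else if c == '@' then 'a'::'t' :: speechScan t
    else if c == '%' then 'p'::'e'::'r'::'c'::'e'::'n'::'t' :: speechScan t
    else if c == '$' then 'd'::'o'::'l'::'l'::'a'::'r'::'s' :: speechScan t
    else if c == '#' then 'n'::'u'::'m'::'b'::'e'::'r' :: speechScan t
    else c :: speechScan t
termination_by l => l.length
decreasing_by all_goals (simp [List.length_drop]; try omega)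


def optimize_for_speech_py_alt (response : String) : String :=
  if response = "" then "I'm here to help you."
  else
    let optimized := String.ofList (speechScan response.toList)
    let optimized :=
      if PySem.Str.endswith optimized "." || PySem.Str.endswith optimized "!" ||
          PySem.Str.endswith optimized "?" then optimized
      else optimized ++ "."
    if 150 < PySem.Str.len optimized then
      let sentences := (PySem.Str.split? optimized ". ").getD []
      if 2 < sentences.length then
        PySem.Str.join ". " (PySem.List.slice sentences none (some 2)) ++ "."
      else optimized
    else optimized

-- ===== PRECONDITION & SPEC =====
def Spec_optimize_for_speech_py (response : String) (out : String) : Prop := out = optimize_for_speech_py_alt response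
instance (response : String) (out : String) : Decidable (Spec_optimize_for_speech_py response out) := by unfold Spec_optimize_for_speech_py; infer_instance

-- ===== CLAIM (what is proved, stated in full; the proofs are below) =====
def Claim_equal_optimize_for_speech_py : Prop := ∀ (response : String), Dom_optimize_for_speech_py response → Spec_optimize_for_speech_py response (optimize_for_speech_py response)

-- ===== LEMMAS AND PROOFS =====

-- repC is a structural restatement of PySem.Chars.replace (nonempty pattern), proved
-- equal to it in replace_eq_repC; all reasoning is done on repC.
def repC (o : Char) (os new : List Char) : List Char → List Char
  | [] => []
  | c :: t =>
    if (o :: os).isPrefixOf (c :: t) then new ++ repC o os new (t.drop os.length)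
    else c :: repC o os new t
termination_by l => l.length
decreasing_by
  · simp only [List.length_cons]; simp [List.length_drop]
  · simp

lemma go_acc (old new : List Char) :
    ∀ fuel (l acc : List Char),
      PySem.Chars.replace.go old new fuel l acc = acc.reverse ++ PySem.Chars.replace.go old new fuel l [] := by
  intro fuel
  induction fuel with
  | zero => intro l acc; rw [PySem.Chars.replace.go.eq_def, PySem.Chars.replace.go.eq_def]; simp
  | succ n ih =>
    intro l acc
    cases l with
    | nil => rw [PySem.Chars.replace.go.eq_def, PySem.Chars.replace.go.eq_def]; simp
    | cons c t =>
      rw [PySem.Chars.replace.go.eq_def]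
      conv_rhs => rw [PySem.Chars.replace.go.eq_def]
      by_cases hp : old.isPrefixOf (c :: t) = true
      · simp only [hp, if_true]
        rw [ih (List.drop old.length (c :: t)) (new.reverse ++ acc),
            ih (List.drop old.length (c :: t)) (new.reverse ++ [])]
        simp
      · simp only [hp, Bool.false_eq_true, if_false]
        rw [ih t (c :: acc), ih t [c]]
        simp

lemma go_spec (o : Char) (os new : List Char) :
    ∀ fuel (l : List Char), l.length ≤ fuel →
      PySem.Chars.replace.go (o :: os) new fuel l [] = repC o os new l := by
  intro fuel
  induction fuel with
  | zero =>
    intro l h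
    have hl : l = [] := by cases l with | nil => rfl | cons a b => simp at h
    subst hl
    rw [PySem.Chars.replace.go.eq_def]; simp [repC]
  | succ n ih =>
    intro l h
    cases l with
    | nil => rw [PySem.Chars.replace.go.eq_def]; simp [repC]
    | cons c t =>
      rw [PySem.Chars.replace.go.eq_def, repC]
      by_cases hp : (o :: os).isPrefixOf (c :: t) = true
      · simp only [hp, if_true]
        rw [go_acc]
        have hd : List.drop (o :: os).length (c :: t) = t.drop os.length := by simp
        rw [hd, ih (t.drop os.length) (by simp [List.length_drop] at h ⊢; omega)]
        simp
      · simp only [hp, Bool.false_eq_true, if_false]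
        rw [go_acc, ih t (by simp at h; omega)]
        simp

lemma replace_eq_repC (o : Char) (os new : List Char) (s : List Char) :
    PySem.Chars.replace s (o :: os) new = repC o os new s := by
  rw [PySem.Chars.replace]
  simp only [List.isEmpty_cons, Bool.false_eq_true, if_false]
  exact go_spec o os new s.length s le_rfl

-- structural equations for repC
lemma repC_nil (o : Char) (os new : List Char) : repC o os new [] = [] := by rw [repC]

lemma repC_pos (o : Char) (os new : List Char) (c : Char) (t : List Char)
    (h : (o :: os).isPrefixOf (c :: t) = true) :
    repC o os new (c :: t) = new ++ repC o os new (t.drop os.length) := by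
  rw [repC]; simp [h]

lemma repC_neg (o : Char) (os new : List Char) (c : Char) (t : List Char)
    (h : (o :: os).isPrefixOf (c :: t) = false) :
    repC o os new (c :: t) = c :: repC o os new t := by
  rw [repC]; simp [h]

-- prefix reflection: if the replacement's first char does not occur in u,
-- any prefix u of (repC ... s) is a prefix of s
lemma repC_reflect (o : Char) (os : List Char) (h0 : Char) (r' : List Char) :
    ∀ (s u : List Char), h0 ∉ u → u <+: repC o os (h0 :: r') s → u <+: s := by
  have main : ∀ (n : Nat) (s u : List Char), s.length ≤ n → h0 ∉ u → u <+: repC o os (h0 :: r') s → u <+: s := by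
    intro n
    induction n with
    | zero =>
      intro s u hn hu hpre
      have hs : s = [] := by cases s with | nil => rfl | cons a b => simp at hn
      subst hs
      rw [repC_nil] at hpre; simpa using hpre
    | succ n ih =>
      intro s u hn hu hpre
      cases s with
      | nil => rw [repC_nil] at hpre; simpa using hpre
      | cons c t =>
        by_cases hp : (o :: os).isPrefixOf (c :: t) = true
        · rw [repC_pos _ _ _ _ _ hp] at hpre
          cases u with
          | nil => exact List.nil_prefix
          | cons x u' =>
            exfalso
            rcases hpre with ⟨w, hw⟩
            have hx : x = h0 := ((by simpa using congrArg (fun l => l.head?) hw.symm : h0 = x)).symm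
            exact hu (by simp [hx])
        · rw [repC_neg _ _ _ _ _ (by simp only [Bool.not_eq_true] at hp; exact hp)] at hpre
          cases u with
          | nil => exact List.nil_prefix
          | cons x u' =>
            rcases hpre with ⟨w, hw⟩
            simp only [List.cons_append, List.cons.injEq] at hw
            obtain ⟨rfl, hw⟩ := hw
            have : u' <+: t := ih t u' (by simp at hn; omega) (by intro hm; exact hu (List.mem_cons_of_mem _ hm)) ⟨w, hw⟩
            exact ⟨this.choose, by rw [List.cons_append, this.choose_spec]⟩
  exact fun s u hu hpre => main s.length s u le_rfl hu hpre

def chainC (s : List Char) : List Char :=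
  repC '#' [] ['n','u','m','b','e','r']
    (repC '$' [] ['d','o','l','l','a','r','s']
      (repC '%' [] ['p','e','r','c','e','n','t']
        (repC '@' [] ['a','t']
          (repC '&' [] ['a','n','d']
            (repC 'J' ['S','O','N'] ['J',' ','S',' ','O',' ','N']
              (repC 'H' ['T','T','P'] ['H',' ','T',' ','T',' ','P']
                (repC 'U' ['R','L'] ['U',' ','R',' ','L']
                  (repC 'A' ['P','I'] ['A',' ','P',' ','I']
                    (repC 'A' ['I'] ['A',' ','I'] s)))))))))

lemma np_through (c0 : Char) (u : List Char) (o : Char) (os r' : List Char) (h0 : Char) (hm : h0 ∉ u)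
    (c : Char) (t Z : List Char) (hZ : Z = repC o os (h0 :: r') t)
    (h : (c0 :: u).isPrefixOf (c :: t) = false) :
    (c0 :: u).isPrefixOf (c :: Z) = false := by
  subst hZ
  rw [Bool.eq_false_iff] at h ⊢
  intro hcontra
  apply h
  rcases List.isPrefixOf_iff_prefix.mp hcontra with ⟨w, hw⟩
  simp only [List.cons_append, List.cons.injEq] at hw
  obtain ⟨rfl, hw⟩ := hw
  have hu : u <+: t := repC_reflect o os h0 r' t u hm ⟨w, hw⟩
  exact List.isPrefixOf_iff_prefix.mpr (by rcases hu with ⟨w2, hw2⟩; exact ⟨w2, by simp [hw2]⟩)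

lemma np_single (x c : Char) (Z : List Char) (h : (c == x) = false) :
    [x].isPrefixOf (c :: Z) = false := by
  have hne : ¬ (c = x) := by simpa using h
  simp only [List.isPrefixOf, Bool.and_eq_false_iff]
  left
  exact beq_eq_false_iff_ne.mpr (fun e => hne (Eq.symm e))

lemma npAPI (c : Char) (t : List Char) (h : ['A','P','I'].isPrefixOf (c :: t) = false) :
    ['A','P','I'].isPrefixOf (c :: repC 'A' ['I'] ['A',' ','I'] t) = false :=
  np_through 'A' ['P','I'] 'A' ['I'] [' ','I'] 'A' (by decide) c t _ rfl h

lemma npURL (c : Char) (t : List Char) (h : ['U','R','L'].isPrefixOf (c :: t) = false) :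
    ['U','R','L'].isPrefixOf (c :: repC 'A' ['P','I'] ['A',' ','P',' ','I'] (repC 'A' ['I'] ['A',' ','I'] t)) = false :=
  np_through 'U' ['R','L'] 'A' ['P','I'] [' ','P',' ','I'] 'A' (by decide) c _ _ rfl
    (np_through 'U' ['R','L'] 'A' ['I'] [' ','I'] 'A' (by decide) c t _ rfl h)

lemma npHTTP (c : Char) (t : List Char) (h : ['H','T','T','P'].isPrefixOf (c :: t) = false) :
    ['H','T','T','P'].isPrefixOf (c :: repC 'U' ['R','L'] ['U',' ','R',' ','L'] (repC 'A' ['P','I'] ['A',' ','P',' ','I'] (repC 'A' ['I'] ['A',' ','I'] t))) = false :=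
  np_through 'H' ['T','T','P'] 'U' ['R','L'] [' ','R',' ','L'] 'U' (by decide) c _ _ rfl
    (np_through 'H' ['T','T','P'] 'A' ['P','I'] [' ','P',' ','I'] 'A' (by decide) c _ _ rfl
      (np_through 'H' ['T','T','P'] 'A' ['I'] [' ','I'] 'A' (by decide) c t _ rfl h))

lemma npJSON (c : Char) (t : List Char) (h : ['J','S','O','N'].isPrefixOf (c :: t) = false) :
    ['J','S','O','N'].isPrefixOf (c :: repC 'H' ['T','T','P'] ['H',' ','T',' ','T',' ','P'] (repC 'U' ['R','L'] ['U',' ','R',' ','L'] (repC 'A' ['P','I'] ['A',' ','P',' ','I'] (repC 'A' ['I'] ['A',' ','I'] t)))) = false :=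
  np_through 'J' ['S','O','N'] 'H' ['T','T','P'] [' ','T',' ','T',' ','P'] 'H' (by decide) c _ _ rfl
    (np_through 'J' ['S','O','N'] 'U' ['R','L'] [' ','R',' ','L'] 'U' (by decide) c _ _ rfl
      (np_through 'J' ['S','O','N'] 'A' ['P','I'] [' ','P',' ','I'] 'A' (by decide) c _ _ rfl
        (np_through 'J' ['S','O','N'] 'A' ['I'] [' ','I'] 'A' (by decide) c t _ rfl h)))

theorem chainC_eq_speechScan (l : List Char) : chainC l = speechScan l := by
  fun_induction speechScan l
  case case1 => simp [chainC, repC_nil]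
  case case2 c t h ih =>
    rcases List.isPrefixOf_iff_prefix.mp h with ⟨v, hv⟩
    have hv2 : 'A'::'I'::v = c :: t := by simpa using hv
    injection hv2 with e1 e2; subst e1; subst e2
    unfold chainC at ih ⊢
    simp only [List.drop_succ_cons, List.drop_zero] at ih ⊢
    simp [repC_pos, repC_neg, List.isPrefixOf, ih]
  case case7 c t h1 h2 h3 h4 h5 h ih =>
    have : c = '&' := by simpa using h
    subst this
    unfold chainC at ih ⊢
    simp [repC_pos, repC_neg, List.isPrefixOf, ih]
  case case3 c t h1 hpos ih =>
    rcases List.isPrefixOf_iff_prefix.mp hpos with ⟨v, hv⟩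
    have hv2 : ['A','P','I'] ++ v = c :: t := by simpa using hv
    simp only [List.cons_append, List.nil_append] at hv2
    injection hv2 with e0 hv2x; subst e0
    subst hv2x
    unfold chainC at ih ⊢
    simp only [List.drop_succ_cons, List.drop_zero] at ih ⊢
    simp [repC_pos, repC_neg, List.isPrefixOf, ih]
  case case4 c t h1 h2 hpos ih =>
    rcases List.isPrefixOf_iff_prefix.mp hpos with ⟨v, hv⟩
    have hv2 : ['U','R','L'] ++ v = c :: t := by simpa using hv
    simp only [List.cons_append, List.nil_append] at hv2
    injection hv2 with e0 hv2x; subst e0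
    subst hv2x
    unfold chainC at ih ⊢
    simp only [List.drop_succ_cons, List.drop_zero] at ih ⊢
    simp [repC_pos, repC_neg, List.isPrefixOf, ih]
  case case5 c t h1 h2 h3 hpos ih =>
    rcases List.isPrefixOf_iff_prefix.mp hpos with ⟨v, hv⟩
    have hv2 : ['H','T','T','P'] ++ v = c :: t := by simpa using hv
    simp only [List.cons_append, List.nil_append] at hv2
    injection hv2 with e0 hv2x; subst e0
    subst hv2x
    unfold chainC at ih ⊢
    simp only [List.drop_succ_cons, List.drop_zero] at ih ⊢
    simp [repC_pos, repC_neg, List.isPrefixOf, ih]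
  case case6 c t h1 h2 h3 h4 hpos ih =>
    rcases List.isPrefixOf_iff_prefix.mp hpos with ⟨v, hv⟩
    have hv2 : ['J','S','O','N'] ++ v = c :: t := by simpa using hv
    simp only [List.cons_append, List.nil_append] at hv2
    injection hv2 with e0 hv2x; subst e0
    subst hv2x
    unfold chainC at ih ⊢
    simp only [List.drop_succ_cons, List.drop_zero] at ih ⊢
    simp [repC_pos, repC_neg, List.isPrefixOf, ih]
  case case8 c t h1 h2 h3 h4 h5 h6 h ih =>
    have hc : c = '@' := by simpa using h
    subst hc
    unfold chainC at ih ⊢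
    simp [repC_pos, repC_neg, List.isPrefixOf, ih]
  case case9 c t h1 h2 h3 h4 h5 h6 h7 h ih =>
    have hc : c = '%' := by simpa using h
    subst hc
    unfold chainC at ih ⊢
    simp [repC_pos, repC_neg, List.isPrefixOf, ih]
  case case10 c t h1 h2 h3 h4 h5 h6 h7 h8 h ih =>
    have hc : c = '$' := by simpa using h
    subst hc
    unfold chainC at ih ⊢
    simp [repC_pos, repC_neg, List.isPrefixOf, ih]
  case case11 c t h1 h2 h3 h4 h5 h6 h7 h8 h9 h ih =>
    have hc : c = '#' := by simpa using h
    subst hc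
    unfold chainC at ih ⊢
    simp [repC_pos, repC_neg, List.isPrefixOf, ih]
  case case12 c t h1 h2 h3 h4 h5 h6 h7 h8 h9 h10 ih =>
    unfold chainC at ih ⊢
    rw [repC_neg _ _ _ _ _ (Bool.eq_false_iff.mpr h1),
        repC_neg _ _ _ _ _ (npAPI _ _ (Bool.eq_false_iff.mpr h2)),
        repC_neg _ _ _ _ _ (npURL _ _ (Bool.eq_false_iff.mpr h3)),
        repC_neg _ _ _ _ _ (npHTTP _ _ (Bool.eq_false_iff.mpr h4)),
        repC_neg _ _ _ _ _ (npJSON _ _ (Bool.eq_false_iff.mpr h5)),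
        repC_neg _ _ _ _ _ (np_single '&' c _ (Bool.eq_false_iff.mpr h6)),
        repC_neg _ _ _ _ _ (np_single '@' c _ (Bool.eq_false_iff.mpr h7)),
        repC_neg _ _ _ _ _ (np_single '%' c _ (Bool.eq_false_iff.mpr h8)),
        repC_neg _ _ _ _ _ (np_single '$' c _ (Bool.eq_false_iff.mpr h9)),
        repC_neg _ _ _ _ _ (np_single '#' c _ (Bool.eq_false_iff.mpr h10)),
        ih]

-- the ten sequential replaces of A compute exactly the one-pass scan of B
lemma chainStr_eq (s : String) :
    PySem.Str.replace (PySem.Str.replace (PySem.Str.replace (PySem.Str.replace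
      (PySem.Str.replace (PySem.Str.replace (PySem.Str.replace (PySem.Str.replace
        (PySem.Str.replace (PySem.Str.replace s "AI" "A I") "API" "A P I")
          "URL" "U R L") "HTTP" "H T T P") "JSON" "J S O N") "&" "and") "@" "at")
            "%" "percent") "$" "dollars") "#" "number"
    = String.ofList (speechScan s.toList) := by
  apply String.toList_inj.mp
  simp only [PySem.Str.toList_replace, String.toList_ofList]
  rw [(by decide : "AI".toList = ['A','I']), (by decide : "A I".toList = ['A',' ','I']),
      (by decide : "API".toList = ['A','P','I']), (by decide : "A P I".toList = ['A',' ','P',' ','I']),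
      (by decide : "URL".toList = ['U','R','L']), (by decide : "U R L".toList = ['U',' ','R',' ','L']),
      (by decide : "HTTP".toList = ['H','T','T','P']), (by decide : "H T T P".toList = ['H',' ','T',' ','T',' ','P']),
      (by decide : "JSON".toList = ['J','S','O','N']), (by decide : "J S O N".toList = ['J',' ','S',' ','O',' ','N']),
      (by decide : "&".toList = ['&']), (by decide : "and".toList = ['a','n','d']),
      (by decide : "@".toList = ['@']), (by decide : "at".toList = ['a','t']),
      (by decide : "%".toList = ['%']), (by decide : "percent".toList = ['p','e','r','c','e','n','t']),
      (by decide : "$".toList = ['$']), (by decide : "dollars".toList = ['d','o','l','l','a','r','s']),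
      (by decide : "#".toList = ['#']), (by decide : "number".toList = ['n','u','m','b','e','r'])]
  rw [replace_eq_repC, replace_eq_repC, replace_eq_repC, replace_eq_repC, replace_eq_repC,
      replace_eq_repC, replace_eq_repC, replace_eq_repC, replace_eq_repC, replace_eq_repC]
  have h := chainC_eq_speechScan s.toList
  unfold chainC at h
  exact h

-- ===== VERDICT (by name: the statement is the Claim_ definition above) =====
theorem optimize_for_speech_py_spec : Claim_equal_optimize_for_speech_py := by
  intro response _
  unfold Spec_optimize_for_speech_py optimize_for_speech_py optimize_for_speech_py_alt
  by_cases h : response = ""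
  · rw [if_pos h, if_pos h]
  · rw [if_neg h, if_neg h]
    simp only [chainStr_eq response]
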